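-- pv_equiv track=rewrite | github.com/privatejfx141/game-of-life | patterns.py | draw_pattern
-- ===== SOURCE A (Python) =====
-- def draw_pattern(pattern):
--     """(list of list) -> str
--
--     Return the string representation of pattern.
--     """
--     res = ''
--     num_rows, num_cols = len(pattern), len(pattern[0])
--     # Loop through each cell.
--     for r in range(num_rows):
--         for c in range(num_cols):
--             res += 'o' if pattern[r][c] else '.'
--             if c != num_cols- 1:
--                 res += ' '
--         if r != num_rows - 1:
--             res += '\n'
--     # Return the string representation.
--     return res
-- ===== SOURCE B (Python) =====
-- def draw_pattern(pattern):
--     """(list of list) -> str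
--
--     Return the string representation of pattern.
--     """
--     num_rows, num_cols = len(pattern), len(pattern[0])
--     if num_cols == 0:
--         return '\n' * (num_rows - 1)
--     # Pre-allocate a flat character buffer filled with separator spaces and
--     # write each cell / newline into its computed slot.
--     row_len = 2 * num_cols          # cells + separators + the slot for '\n'
--     buf = [' '] * (num_rows * row_len - 1)
--     for r in range(num_rows):
--         base = r * row_len
--         if r != 0:
--             buf[base - 1] = '\n'
--         row = pattern[r]
--         for c in range(num_cols):
--             buf[base + 2 * c] = 'o' if row[c] else '.'
--     return ''.join(buf)
-- ===== Notes on version B (the rewrite author's own statement) =====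
-- stated objective: alternative
-- what changed: Instead of appending cell-by-cell with last-index branches, B pre-allocates a flat buffer of separator spaces of the exact output length and writes each cell character and newline into its arithmetically computed slot, then joins the buffer once.
import Mathlib
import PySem

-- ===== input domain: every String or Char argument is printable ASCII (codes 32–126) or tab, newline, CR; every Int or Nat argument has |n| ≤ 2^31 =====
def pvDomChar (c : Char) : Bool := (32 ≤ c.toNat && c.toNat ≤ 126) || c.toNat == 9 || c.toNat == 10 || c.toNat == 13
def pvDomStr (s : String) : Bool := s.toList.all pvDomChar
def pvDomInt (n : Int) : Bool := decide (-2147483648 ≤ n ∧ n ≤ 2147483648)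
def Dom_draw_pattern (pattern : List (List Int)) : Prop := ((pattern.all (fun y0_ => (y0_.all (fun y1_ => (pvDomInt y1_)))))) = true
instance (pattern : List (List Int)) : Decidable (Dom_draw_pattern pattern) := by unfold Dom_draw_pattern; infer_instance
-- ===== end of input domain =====

-- B replaces A's sequential cell-by-cell string appends (with last-index separator branches) by a
-- pre-allocated flat buffer of separator spaces into which each cell character and newline is
-- written at an arithmetically computed slot; same asymptotic cost, different construction.

-- ===== PORT A =====
def draw_pattern (pattern : List (List Int)) : String :=
  let num_rows : Int := pattern.length
  let num_cols : Int := (PySem.List.pyGetD pattern 0 []).length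
  (PySem.List.pyRange 0 num_rows 1).foldl (fun res r =>
    let res := (PySem.List.pyRange 0 num_cols 1).foldl (fun res c =>
      let res := res ++ (if PySem.List.pyGetD (PySem.List.pyGetD pattern r []) c 0 ≠ 0 then "o" else ".")
      if c ≠ num_cols - 1 then res ++ " " else res) res
    if r ≠ num_rows - 1 then res ++ "\n" else res) ""

-- ===== PORT B =====
-- The Python buffer holds one-character strings; it is ported as a List Char and the final
-- ''.join(buf) as String.ofList, which is exact since every element is a single character.
-- '\n' * (num_rows - 1) is ported with .toNat: Python's negative string repeat is '' and
-- .toNat clamps negatives to 0, so this is exact for every num_rows.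
def draw_pattern_alt (pattern : List (List Int)) : String :=
  let num_rows : Int := pattern.length
  let num_cols : Int := (PySem.List.pyGetD pattern 0 []).length
  if num_cols = 0 then String.ofList (List.replicate (num_rows - 1).toNat '\n')
  else
    let row_len : Int := 2 * num_cols
    let buf : List Char := List.replicate (num_rows * row_len - 1).toNat ' '
    let buf := (PySem.List.pyRange 0 num_rows 1).foldl (fun buf r =>
      let base := r * row_len
      let buf := if r ≠ 0 then PySem.List.pySetD buf (base - 1) '\n' else buf
      let row := PySem.List.pyGetD pattern r []
      (PySem.List.pyRange 0 num_cols 1).foldl (fun buf c =>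
        PySem.List.pySetD buf (base + 2 * c)
          (if PySem.List.pyGetD row c 0 ≠ 0 then 'o' else '.')) buf) buf
    String.ofList buf

-- ===== PRECONDITION & SPEC =====
-- Pre_ excludes exactly the inputs on which the Python A raises IndexError: the empty
-- pattern (pattern[0]) and ragged patterns with a row shorter than the first row
-- (pattern[r][c] for c < len(pattern[0])). B raises there too.
def Pre_draw_pattern (pattern : List (List Int)) : Prop :=
  pattern ≠ [] ∧ ∀ row ∈ pattern, (pattern.headD []).length ≤ row.length
instance (pattern : List (List Int)) : Decidable (Pre_draw_pattern pattern) := by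
  unfold Pre_draw_pattern; infer_instance
def pvWitness_draw_pattern : List (List Int) := [[1, 0], [0, 1]]

def Spec_draw_pattern (pattern : List (List Int)) (out : String) : Prop := out = draw_pattern_alt pattern
instance (pattern : List (List Int)) (out : String) : Decidable (Spec_draw_pattern pattern out) := by unfold Spec_draw_pattern; infer_instance

-- ===== CLAIM (what is proved, stated in full; the proofs are below) =====
def Claim_equal_draw_pattern : Prop := ∀ (pattern : List (List Int)), Dom_draw_pattern pattern → Pre_draw_pattern pattern → Spec_draw_pattern pattern (draw_pattern pattern)

-- ===== LEMMAS AND PROOFS =====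

-- Common normal form both ports are reduced to: "\n".join of the rows, each row " ".join of cells.
def pvJoined (pattern : List (List Int)) : String :=
  PySem.Str.join "\n" ((PySem.List.pyRange 0 (pattern.length : Int) 1).map (fun r =>
    PySem.Str.join " " ((PySem.List.pyRange 0 ((PySem.List.pyGetD pattern 0 []).length : Int) 1).map (fun c =>
      if PySem.List.pyGetD (PySem.List.pyGetD pattern r []) c 0 ≠ 0 then "o" else "."))))

-- character-level building blocks (for the B side)
def pvCellCh (pattern : List (List Int)) (r c : Int) : Char :=
  if PySem.List.pyGetD (PySem.List.pyGetD pattern r []) c 0 ≠ 0 then 'o' else '.'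
def pvRowT (pattern : List (List Int)) (C : Nat) (r : Int) : List Char :=
  PySem.Chars.join [' '] ((PySem.List.pyRange 0 (C : Int) 1).map (fun c => [pvCellCh pattern r c]))
def pvD (pattern : List (List Int)) (C k : Nat) : List Char :=
  PySem.Chars.join ['\n'] ((PySem.List.pyRange 0 (k : Int) 1).map (pvRowT pattern C))

-- ---------- A side ----------

-- A string foldl that only appends on the right, expressed by its character list.
theorem strfold_toList (g : Int → String) (l : List Int) (init : String) :
    (l.foldl (fun res c => res ++ g c) init).toList
      = init.toList ++ l.flatMap (fun c => (g c).toList) := by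
  induction l generalizing init with
  | nil => simp
  | cons a l ih => simp [List.foldl_cons, ih, String.toList_append]

-- 'join sep' of a list with its last element split off.
theorem join_append_singleton (sep : List Char) (xs : List (List Char)) (x : List Char) :
    PySem.Chars.join sep (xs ++ [x]) = xs.flatMap (fun p => p ++ sep) ++ x := by
  induction xs with
  | nil => simp [PySem.Chars.join, List.intercalate]
  | cons y ys ih =>
    cases ys with
    | nil => simp [PySem.Chars.join, List.intercalate, List.intersperse]
    | cons z zs =>
      rw [List.cons_append, List.cons_append, PySem.Chars.join_cons_cons,
          ← List.cons_append, ih]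
      simp

-- The separator-per-non-last-index flatMap over range(n) IS 'sep.join'.
theorem key (g : Int → List Char) (sep : List Char) (n : Nat) :
    (PySem.List.pyRange 0 n 1).flatMap (fun c => g c ++ if c ≠ (n : Int) - 1 then sep else [])
      = PySem.Chars.join sep ((PySem.List.pyRange 0 n 1).map g) := by
  cases n with
  | zero => simp [PySem.Chars.join, List.intercalate]
  | succ m =>
    have hsplit : PySem.List.pyRange 0 ((m : Int) + 1) 1
        = PySem.List.pyRange 0 (m : Int) 1 ++ [(m : Int)] := by
      simpa using PySem.List.pyRange_one_succ_right (a := 0) (b := (m : Int)) (by positivity)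
    have hm : ((m : Int) + 1 : Int) = ((m + 1 : Nat) : Int) := by push_cast; ring
    rw [← hm, hsplit]
    rw [List.flatMap_append, List.map_append, List.map_singleton, join_append_singleton]
    have hcongr : (PySem.List.pyRange 0 (m : Int) 1).flatMap
          (fun c => g c ++ if c ≠ (m : Int) + 1 - 1 then sep else [])
        = (PySem.List.pyRange 0 (m : Int) 1).flatMap (fun c => g c ++ sep) := by
      rw [List.flatMap_eq_foldl, List.flatMap_eq_foldl]
      apply PySem.List.foldl_congr_mem
      intro acc c hc
      have := (PySem.List.mem_pyRange_one.mp hc).2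
      have hne : c ≠ (m : Int) + 1 - 1 := by omega
      rw [if_pos hne]
    rw [hcongr]
    simp [List.flatMap_map]

-- Characters of one row of the normal form.
theorem row_toList (pattern : List (List Int)) (nc : Nat) (r : Int) :
    (PySem.Str.join " " ((PySem.List.pyRange 0 (nc : Int) 1).map (fun c =>
        if PySem.List.pyGetD (PySem.List.pyGetD pattern r []) c 0 ≠ 0 then "o" else "."))).toList
      = (PySem.List.pyRange 0 (nc : Int) 1).flatMap (fun c =>
          (if PySem.List.pyGetD (PySem.List.pyGetD pattern r []) c 0 ≠ 0 then "o" else ".").toList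
            ++ if c ≠ (nc : Int) - 1 then [' '] else []) := by
  rw [PySem.Str.toList_join, List.map_map, key
    (g := fun c => (if PySem.List.pyGetD (PySem.List.pyGetD pattern r []) c 0 ≠ 0 then "o" else ".").toList)]
  simp [Function.comp_def]

-- The inner loop of A builds exactly one row of the normal form (appended to the accumulator).
theorem inner_eq (pattern : List (List Int)) (nc : Nat) (r : Int) (res : String) :
    ((PySem.List.pyRange 0 (nc : Int) 1).foldl (fun res c =>
        let res := res ++ (if PySem.List.pyGetD (PySem.List.pyGetD pattern r []) c 0 ≠ 0 then "o" else ".")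
        if c ≠ (nc : Int) - 1 then res ++ " " else res) res)
      = res ++ PySem.Str.join " " ((PySem.List.pyRange 0 (nc : Int) 1).map (fun c =>
          if PySem.List.pyGetD (PySem.List.pyGetD pattern r []) c 0 ≠ 0 then "o" else ".")) := by
  apply String.toList_inj.mp
  have hbody : (fun (res : String) (c : Int) =>
        let res := res ++ (if PySem.List.pyGetD (PySem.List.pyGetD pattern r []) c 0 ≠ 0 then "o" else ".")
        if c ≠ (nc : Int) - 1 then res ++ " " else res)
      = fun (res : String) (c : Int) => res ++
          ((if PySem.List.pyGetD (PySem.List.pyGetD pattern r []) c 0 ≠ 0 then "o" else ".")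
            ++ if c ≠ (nc : Int) - 1 then " " else "") := by
    funext res c
    by_cases h : c ≠ (nc : Int) - 1 <;> simp [h, String.append_assoc]
  rw [hbody, strfold_toList, String.toList_append, row_toList]
  congr 1
  apply List.flatMap_congr
  intro c _
  by_cases h : c ≠ (nc : Int) - 1 <;> simp [h, String.toList_append]

-- A equals the normal form (unconditionally: the port is total).
theorem A_eq (pattern : List (List Int)) : draw_pattern pattern = pvJoined pattern := by
  unfold draw_pattern pvJoined
  dsimp only
  apply String.toList_inj.mp
  have hbody : (fun (res : String) (r : Int) =>
        let res := (PySem.List.pyRange 0 ((PySem.List.pyGetD pattern 0 []).length : Int) 1).foldl (fun res c =>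
          let res := res ++ (if PySem.List.pyGetD (PySem.List.pyGetD pattern r []) c 0 ≠ 0 then "o" else ".")
          if c ≠ ((PySem.List.pyGetD pattern 0 []).length : Int) - 1 then res ++ " " else res) res
        if r ≠ (pattern.length : Int) - 1 then res ++ "\n" else res)
      = fun (res : String) (r : Int) => res ++
          (PySem.Str.join " " ((PySem.List.pyRange 0 ((PySem.List.pyGetD pattern 0 []).length : Int) 1).map (fun c =>
            if PySem.List.pyGetD (PySem.List.pyGetD pattern r []) c 0 ≠ 0 then "o" else "."))
            ++ if r ≠ (pattern.length : Int) - 1 then "\n" else "") := by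
    funext res r
    rw [inner_eq pattern (PySem.List.pyGetD pattern 0 []).length r res]
    by_cases h : r ≠ (pattern.length : Int) - 1 <;> simp [h, String.append_assoc]
  rw [hbody, strfold_toList, PySem.Str.toList_join, List.map_map]
  have hnl : ("\n" : String).toList = ['\n'] := rfl
  rw [hnl]
  simp only [Function.comp_def, String.toList_empty, List.nil_append]
  rw [← key (g := fun r => (PySem.Str.join " " ((PySem.List.pyRange 0 ((PySem.List.pyGetD pattern 0 []).length : Int) 1).map (fun c =>
        if PySem.List.pyGetD (PySem.List.pyGetD pattern r []) c 0 ≠ 0 then "o" else "."))).toList)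
      (sep := ['\n']) (n := pattern.length)]
  apply List.flatMap_congr
  intro r _
  by_cases h : r ≠ (pattern.length : Int) - 1 <;> simp [h, String.toList_append]

-- ---------- B side ----------

theorem join_snoc (sep y : List Char) (xs : List (List Char)) (h : xs ≠ []) :
    PySem.Chars.join sep (xs ++ [y]) = PySem.Chars.join sep xs ++ sep ++ y := by
  induction xs with
  | nil => exact absurd rfl h
  | cons x xs ih =>
    cases xs with
    | nil => simp [PySem.Chars.join_cons_cons, PySem.Chars.join_singleton]
    | cons z zs =>
      rw [List.cons_append, List.cons_append, PySem.Chars.join_cons_cons, ← List.cons_append,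
          ih (by simp), PySem.Chars.join_cons_cons]
      simp [List.append_assoc]

theorem range_succ_split (n : Nat) :
    PySem.List.pyRange 0 ((n+1 : Nat) : Int) 1 = PySem.List.pyRange 0 (n : Int) 1 ++ [(n : Int)] := by
  have := PySem.List.pyRange_one_succ_right (a := 0) (b := (n : Int)) (by positivity)
  push_cast
  simpa using this

theorem range_ne_nil (n : Nat) (hn : 1 ≤ n) : PySem.List.pyRange 0 (n : Int) 1 ≠ [] := by
  apply List.ne_nil_of_length_pos
  rw [PySem.List.length_pyRange_one]
  omega

theorem len_rowJ (cell : Int → Char) (C : Nat) (hC : 1 ≤ C) :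
    (PySem.Chars.join [' '] ((PySem.List.pyRange 0 (C : Int) 1).map (fun c => [cell c]))).length
      = 2 * C - 1 := by
  induction C, hC using Nat.le_induction with
  | base =>
    rw [show ((1:Nat):Int) = 0 + 1 from rfl, PySem.List.pyRange_one_singleton]
    simp [PySem.Chars.join_singleton]
  | succ n hn ih =>
    rw [range_succ_split, List.map_append, List.map_singleton,
        join_snoc _ _ _ (by simp [range_ne_nil n hn]), List.length_append, List.length_append, ih]
    simp
    omega

theorem join_newlines (R : Nat) :
    PySem.Chars.join ['\n'] (List.replicate R ([] : List Char)) = List.replicate (R - 1) '\n' := by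
  induction R with
  | zero => simp [PySem.Chars.join_nil]
  | succ n ih =>
    cases n with
    | zero => simp [PySem.Chars.join_singleton]
    | succ m =>
      have hrep : List.replicate (m+1) ([] : List Char) = [] :: List.replicate m [] :=
        List.replicate_succ
      have h2 : List.replicate (m+1+1) ([] : List Char) = [] :: [] :: List.replicate m [] := by
        simp [List.replicate_succ]
      rw [h2, PySem.Chars.join_cons_cons, ← hrep, ih]
      simp [List.replicate_succ]

theorem set_append_shift (xs ys : List Char) (i : Nat) (a : Char) :
    (xs ++ ys).set (xs.length + i) a = xs ++ ys.set i a := by simp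

theorem innerB (cell : Int → Char) (C : Nat) (hC : 1 ≤ C) :
    ∀ (pre : List Char) (m : Nat), 2 * C - 1 ≤ m →
    (PySem.List.pyRange 0 (C : Int) 1).foldl
      (fun buf c => PySem.List.pySetD buf ((pre.length : Int) + 2 * c) (cell c))
      (pre ++ List.replicate m ' ')
    = pre ++ PySem.Chars.join [' '] ((PySem.List.pyRange 0 (C : Int) 1).map (fun c => [cell c]))
        ++ List.replicate (m - (2 * C - 1)) ' ' := by
  induction C, hC using Nat.le_induction with
  | base =>
    intro pre m hm
    obtain ⟨m', rfl⟩ : ∃ m', m = m' + 1 := ⟨m - 1, by omega⟩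
    rw [show ((1:Nat):Int) = 0 + 1 from rfl, PySem.List.pyRange_one_singleton]
    simp [PySem.Chars.join_singleton, List.replicate_succ]
  | succ n hn ih =>
    intro pre m hm
    rw [range_succ_split, List.foldl_append, ih pre m (by omega), List.foldl_cons, List.foldl_nil]
    have hlen : (pre ++ PySem.Chars.join [' ']
        ((PySem.List.pyRange 0 (n : Int) 1).map (fun c => [cell c]))).length
        = pre.length + (2 * n - 1) := by
      rw [List.length_append, len_rowJ cell n hn]
    have hidx : ((pre.length : Int) + 2 * (n : Int))
        = (((pre ++ PySem.Chars.join [' ']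
            ((PySem.List.pyRange 0 (n : Int) 1).map (fun c => [cell c]))).length + 1 : Nat) : Int) := by
      rw [hlen]; push_cast; omega
    obtain ⟨m', hm'⟩ : ∃ m', m - (2 * n - 1) = m' + 2 := ⟨m - (2*n-1) - 2, by omega⟩
    have h1 : List.replicate (m' + 2) ' ' = ' ' :: ' ' :: List.replicate m' ' ' := by
      simp [List.replicate_succ]
    have hm2 : m - (2 * (n + 1) - 1) = m' := by omega
    rw [hidx, PySem.List.pySetD_natCast, hm', h1, List.map_append, List.map_singleton,
        join_snoc _ _ _ (by simp [range_ne_nil n hn]), hm2, set_append_shift]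
    simp [List.append_assoc]

theorem len_pvD (pattern : List (List Int)) (C : Nat) (hC : 1 ≤ C) :
    ∀ (k : Nat), 1 ≤ k → (pvD pattern C k).length = 2 * C * k - 1 := by
  intro k hk
  induction k, hk using Nat.le_induction with
  | base =>
    unfold pvD
    rw [show ((1:Nat):Int) = 0 + 1 from rfl, PySem.List.pyRange_one_singleton]
    rw [List.map_singleton, PySem.Chars.join_singleton]
    unfold pvRowT
    rw [len_rowJ _ C hC]
    omega
  | succ k hk ih =>
    unfold pvD at *
    rw [range_succ_split, List.map_append, List.map_singleton,
        join_snoc _ _ _ (by simp [range_ne_nil k hk]), List.length_append, List.length_append, ih]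
    unfold pvRowT
    rw [len_rowJ _ C hC]
    have h1 : 1 ≤ 2 * C * k := Nat.one_le_iff_ne_zero.mpr (by positivity)
    rw [List.length_singleton, Nat.mul_succ, Nat.sub_add_cancel h1]
    omega

theorem outerB (pattern : List (List Int)) (C R : Nat) (hC : 1 ≤ C) :
    ∀ (k : Nat), 1 ≤ k → k ≤ R →
    (PySem.List.pyRange 0 (k : Int) 1).foldl (fun buf r =>
        let base := r * (2 * (C : Int))
        let buf := if r ≠ 0 then PySem.List.pySetD buf (base - 1) '\n' else buf
        let row := PySem.List.pyGetD pattern r []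
        (PySem.List.pyRange 0 (C : Int) 1).foldl (fun buf c =>
          PySem.List.pySetD buf (base + 2 * c)
            (if PySem.List.pyGetD row c 0 ≠ 0 then 'o' else '.')) buf)
      (List.replicate (2 * C * R - 1) ' ')
    = pvD pattern C k ++ List.replicate (2 * C * (R - k)) ' ' := by
  intro k hk
  induction k, hk using Nat.le_induction with
  | base =>
    intro hR
    rw [show ((1:Nat):Int) = 0 + 1 from rfl, PySem.List.pyRange_one_singleton,
        List.foldl_cons, List.foldl_nil]
    dsimp only
    rw [if_neg (by omega)]
    have hfun : (fun (buf : List Char) (c : Int) =>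
          PySem.List.pySetD buf ((0 : Int) * (2 * (C : Int)) + 2 * c)
            (if PySem.List.pyGetD (PySem.List.pyGetD pattern 0 []) c 0 ≠ 0 then 'o' else '.'))
        = fun (buf : List Char) (c : Int) =>
          PySem.List.pySetD buf ((([] : List Char).length : Int) + 2 * c)
            (if PySem.List.pyGetD (PySem.List.pyGetD pattern 0 []) c 0 ≠ 0 then 'o' else '.') := by
      funext buf c; norm_num
    have hCR : 2 * C ≤ 2 * C * R := Nat.le_mul_of_pos_right _ (by omega)
    have hrepl : List.replicate (2 * C * R - 1) ' ' = [] ++ List.replicate (2 * C * R - 1) ' ' := rfl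
    rw [hfun, hrepl, innerB _ C hC [] (2 * C * R - 1) (by omega)]
    unfold pvD
    rw [show ((1:Nat):Int) = 0 + 1 from rfl, PySem.List.pyRange_one_singleton,
        List.map_singleton, PySem.Chars.join_singleton]
    unfold pvRowT pvCellCh
    have : 2 * C * R - 1 - (2 * C - 1) = 2 * C * (R - 1) := by
      rw [Nat.mul_sub]; omega
    rw [this]
    simp
  | succ k hk ih =>
    intro hR
    rw [range_succ_split, List.foldl_append, ih (by omega), List.foldl_cons, List.foldl_nil]
    dsimp only
    rw [if_pos (by exact_mod_cast Nat.one_le_iff_ne_zero.mp hk)]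
    have h1 : 1 ≤ 2 * C * k := Nat.one_le_iff_ne_zero.mpr (by positivity)
    have hlenD := len_pvD pattern C hC k hk
    have hidx1 : ((k : Int) * (2 * (C : Int)) - 1)
        = (((pvD pattern C k).length + 0 : Nat) : Int) := by
      rw [hlenD]; push_cast [Nat.cast_sub h1]; ring
    obtain ⟨t, ht⟩ : ∃ t, 2 * C * (R - k) = t + 1 := by
      have : 2 * C ≤ 2 * C * (R - k) := Nat.le_mul_of_pos_right _ (by omega)
      exact ⟨2 * C * (R - k) - 1, by omega⟩
    have hrep : List.replicate (2 * C * (R - k)) ' ' = ' ' :: List.replicate t ' ' := by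
      rw [ht, List.replicate_succ]
    rw [hidx1, PySem.List.pySetD_natCast, hrep, set_append_shift, List.set_cons_zero]
    have hassoc : pvD pattern C k ++ '\n' :: List.replicate t ' '
        = (pvD pattern C k ++ ['\n']) ++ List.replicate t ' ' := by simp
    have hfun : (fun (buf : List Char) (c : Int) =>
          PySem.List.pySetD buf ((k : Int) * (2 * (C : Int)) + 2 * c)
            (if PySem.List.pyGetD (PySem.List.pyGetD pattern (k : Int) []) c 0 ≠ 0 then 'o' else '.'))
        = fun (buf : List Char) (c : Int) =>
          PySem.List.pySetD buf (((pvD pattern C k ++ ['\n']).length : Int) + 2 * c)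
            (if PySem.List.pyGetD (PySem.List.pyGetD pattern (k : Int) []) c 0 ≠ 0 then 'o' else '.') := by
      funext buf c
      rw [List.length_append, List.length_singleton, hlenD]
      push_cast [Nat.cast_sub h1]
      ring_nf
    have htm : 2 * C - 1 ≤ t := by
      have : 2 * C ≤ 2 * C * (R - k) := Nat.le_mul_of_pos_right _ (by omega)
      omega
    rw [hassoc, hfun, innerB _ C hC (pvD pattern C k ++ ['\n']) t htm]
    have hD1 : pvD pattern C (k + 1) = pvD pattern C k ++ ['\n'] ++ pvRowT pattern C (k : Int) := by
      unfold pvD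
      rw [range_succ_split, List.map_append, List.map_singleton,
          join_snoc _ _ _ (by simp [range_ne_nil k hk])]
    have ht2 : t - (2 * C - 1) = 2 * C * (R - (k + 1)) := by
      rw [show R - (k + 1) = (R - k) - 1 from by omega, Nat.mul_sub]
      omega
    rw [hD1, ht2]
    unfold pvRowT pvCellCh
    simp [List.append_assoc]

theorem toList_pvJoined (pattern : List (List Int)) :
    (pvJoined pattern).toList
      = pvD pattern ((PySem.List.pyGetD pattern 0 []).length) pattern.length := by
  unfold pvJoined pvD
  rw [PySem.Str.toList_join, List.map_map]
  have hnl : ("\n" : String).toList = ['\n'] := rfl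
  rw [hnl]
  apply congrArg
  apply List.map_congr_left
  intro r _
  unfold pvRowT
  simp only [Function.comp_def]
  rw [PySem.Str.toList_join, List.map_map]
  have hsp : (" " : String).toList = [' '] := rfl
  rw [hsp]
  apply congrArg
  apply List.map_congr_left
  intro c _
  unfold pvCellCh
  simp only [Function.comp_def]
  by_cases h : PySem.List.pyGetD (PySem.List.pyGetD pattern r []) c 0 ≠ 0 <;> simp [h]

theorem B_eq (pattern : List (List Int)) (hne : pattern ≠ []) :
    draw_pattern_alt pattern = pvJoined pattern := by
  have hR : 1 ≤ pattern.length := List.length_pos_of_ne_nil hne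
  unfold draw_pattern_alt
  dsimp only
  by_cases hC0 : ((PySem.List.pyGetD pattern 0 []).length : Int) = 0
  · rw [if_pos hC0]
    have hC0' : (PySem.List.pyGetD pattern 0 []).length = 0 := by exact_mod_cast hC0
    apply String.toList_inj.mp
    rw [String.toList_ofList, toList_pvJoined]
    unfold pvD
    have : (PySem.List.pyRange 0 ((pattern.length : Int)) 1).map (pvRowT pattern (PySem.List.pyGetD pattern 0 []).length)
        = List.replicate pattern.length ([] : List Char) := by
      rw [show (PySem.List.pyRange 0 ((pattern.length : Int)) 1).map (pvRowT pattern (PySem.List.pyGetD pattern 0 []).length)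
            = (PySem.List.pyRange 0 ((pattern.length : Int)) 1).map (fun _ => ([] : List Char)) from ?_]
      · rw [List.map_const', PySem.List.length_pyRange_one]
        simp
      · apply List.map_congr_left
        intro r _
        unfold pvRowT
        rw [hC0']
        simp [PySem.Chars.join_nil]
    rw [this, join_newlines]
    congr 1
    omega
  · rw [if_neg hC0]
    have hC : 1 ≤ (PySem.List.pyGetD pattern 0 []).length := by
      rcases Nat.eq_zero_or_pos (PySem.List.pyGetD pattern 0 []).length with h | h
      · exact absurd (by exact_mod_cast h) hC0
      · exact h
    apply String.toList_inj.mp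
    rw [String.toList_ofList, toList_pvJoined]
    have hcnt : ((pattern.length : Int) * (2 * ((PySem.List.pyGetD pattern 0 []).length : Int)) - 1).toNat
        = 2 * (PySem.List.pyGetD pattern 0 []).length * pattern.length - 1 := by
      have h1 : 1 ≤ 2 * (PySem.List.pyGetD pattern 0 []).length * pattern.length :=
        Nat.one_le_iff_ne_zero.mpr (by positivity)
      have h2 : ((pattern.length : Int) * (2 * ((PySem.List.pyGetD pattern 0 []).length : Int)) - 1)
          = ((2 * (PySem.List.pyGetD pattern 0 []).length * pattern.length - 1 : Nat) : Int) := by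
        push_cast [Nat.cast_sub h1]; ring
      rw [h2, Int.toNat_natCast]
    rw [hcnt, outerB pattern _ pattern.length hC pattern.length hR le_rfl]
    simp

-- ===== VERDICT (by name: the statement is the Claim_ definition above) =====
theorem draw_pattern_spec : Claim_equal_draw_pattern := by
  intro pattern _ hpre
  unfold Spec_draw_pattern
  rw [A_eq, B_eq pattern hpre.1]
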